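-- pv_equiv track=rewrite | github.com/aidanhadley/advent2023 | 2023/python/src/day11o.py | find_empties
-- ===== SOURCE A (Python) =====
-- def find_empties(graph):
--     # taking this method from nia lol
--     # horizontal first el oh el
--     ys = []
--     for y, line in enumerate(graph):
--         if len(set(line)) == 1:
--             ys.append(y)
--     # vertical next
--     xs = []
--     for x in range(len(graph[0])):
--         check = []
--         for line in graph:
--             check.append(line[x])
--         # we made a vertical line! check it
--         if len(set(check)) == 1:
--             xs.append(x)
--     return [xs, ys]
-- ===== SOURCE B (Python) =====
-- def find_empties(graph):
--     # single combined sweep: row uniformity and per-column sets in one pass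
--     width = len(graph[0])
--     col_sets = [set() for _ in range(width)]
--     ys = []
--     for y, line in enumerate(graph):
--         if len(set(line)) == 1:
--             ys.append(y)
--         col_sets = [s | {line[x]} for x, s in enumerate(col_sets)]
--     xs = [x for x in range(width) if len(col_sets[x]) == 1]
--     return [xs, ys]
-- ===== Notes on version B (the rewrite author's own statement) =====
-- stated objective: alternative
-- what changed: A makes a row pass and then a second pass that rebuilds every column as a list; B makes one combined sweep over the grid that judges each row and accumulates one set per column simultaneously, then filters the column indices.
import Mathlib
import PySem

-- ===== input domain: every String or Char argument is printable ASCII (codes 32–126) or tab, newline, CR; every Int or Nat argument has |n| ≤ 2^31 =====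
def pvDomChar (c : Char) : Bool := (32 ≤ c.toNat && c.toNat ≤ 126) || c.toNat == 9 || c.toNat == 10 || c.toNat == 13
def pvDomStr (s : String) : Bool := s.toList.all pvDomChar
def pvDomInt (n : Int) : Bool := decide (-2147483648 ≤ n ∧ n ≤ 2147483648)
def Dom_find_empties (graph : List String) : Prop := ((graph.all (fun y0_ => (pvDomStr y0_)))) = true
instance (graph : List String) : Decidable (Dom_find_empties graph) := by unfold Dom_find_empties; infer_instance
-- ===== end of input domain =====

-- B replaces A's two passes (rows, then rebuilding each column as a list) by one combined
-- sweep accumulating per-column sets; same cost, different decomposition.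


-- ===== PORT A =====
def find_empties (graph : List String) : List (List Int) :=
  let ys : List Int := (PySem.List.enumerate graph).foldl
    (fun ys p => if PySem.Set.len (PySem.Set.ofList p.2.toList) == 1 then ys ++ [p.1] else ys) []
  let xs : List Int := (PySem.List.pyRange 0 (PySem.Str.len (PySem.List.pyGetD graph 0 "")) 1).foldl
    (fun xs x =>
      let check : List Char := graph.foldl (fun ch line => ch ++ [PySem.List.pyGetD line.toList x ' ']) []
      if PySem.Set.len (PySem.Set.ofList check) == 1 then xs ++ [x] else xs) []
  [xs, ys]

-- ===== PORT B =====
def find_empties_alt (graph : List String) : List (List Int) :=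
  let width : Int := PySem.Str.len (PySem.List.pyGetD graph 0 "")
  let init : List (PySem.Set Char) := (PySem.List.pyRange 0 width 1).map (fun _ => PySem.Set.empty)
  let st := (PySem.List.enumerate graph).foldl
    (fun st p =>
      ((PySem.List.enumerate st.1).map
         (fun q => PySem.Set.union q.2 (PySem.Set.ofList [PySem.List.pyGetD p.2.toList q.1 ' '])),
       if PySem.Set.len (PySem.Set.ofList p.2.toList) == 1 then st.2 ++ [p.1] else st.2))
    (init, ([] : List Int))
  let xs : List Int := (PySem.List.pyRange 0 width 1).filter
    (fun x => PySem.Set.len (PySem.List.pyGetD st.1 x []) == 1)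
  [xs, st.2]

-- ===== PRECONDITION & SPEC =====
-- Pre_ excludes inputs where A raises IndexError: the empty grid (graph[0]) and
-- ragged grids with a row shorter than the first row (line[x]).
def Pre_find_empties (graph : List String) : Prop :=
  graph ≠ [] ∧ ∀ s ∈ graph, (graph.headD "").toList.length ≤ s.toList.length
instance (graph : List String) : Decidable (Pre_find_empties graph) := by
  unfold Pre_find_empties; infer_instance
def pvWitness_find_empties : List String := ["#.#", "...", "#.#"]
def Spec_find_empties (graph : List String) (out : List (List Int)) : Prop := out = find_empties_alt graph
instance (graph : List String) (out : List (List Int)) : Decidable (Spec_find_empties graph out) := by unfold Spec_find_empties; infer_instance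

-- ===== CLAIM (what is proved, stated in full; the proofs are below) =====
def Claim_equal_find_empties : Prop := ∀ (graph : List String), Dom_find_empties graph → Pre_find_empties graph → Spec_find_empties graph (find_empties graph)

-- ===== LEMMAS AND PROOFS =====

-- one step of B's combined sweep on the column sets
def pvStep (line : String) (cols : List (PySem.Set Char)) : List (PySem.Set Char) :=
  (PySem.List.enumerate cols).map
    (fun q => PySem.Set.union q.2 (PySem.Set.ofList [PySem.List.pyGetD line.toList q.1 ' ']))

theorem pvUnion_singleton (s : PySem.Set Char) (c : Char) :
    PySem.Set.union s (PySem.Set.ofList [c]) = PySem.Set.add s c := by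
  simp [PySem.Set.union, PySem.Set.update, PySem.Set.ofList]

theorem pvStep_length (line : String) (cols : List (PySem.Set Char)) :
    (pvStep line cols).length = cols.length := by
  simp [pvStep, PySem.List.length_enumerate]

theorem pvStep_getElem (line : String) (cols : List (PySem.Set Char)) (k : Nat)
    (hk : k < cols.length) :
    (pvStep line cols)[k]'(by rw [pvStep_length]; exact hk)
      = PySem.Set.add cols[k] (PySem.List.pyGetD line.toList (k : Int) ' ') := by
  simp [pvStep, PySem.List.getElem_enumerate, pvUnion_singleton]

theorem pvFold_length (lines : List String) :
    ∀ cols : List (PySem.Set Char),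
      (lines.foldl (fun c l => pvStep l c) cols).length = cols.length := by
  induction lines with
  | nil => intro cols; rfl
  | cons l ls ih => intro cols; simp only [List.foldl_cons]; rw [ih, pvStep_length]

theorem pvFold_getElem (lines : List String) :
    ∀ (cols : List (PySem.Set Char)) (k : Nat) (hk : k < cols.length),
      (lines.foldl (fun c l => pvStep l c) cols)[k]'(by rw [pvFold_length]; exact hk)
        = PySem.Set.update cols[k]
            (lines.map (fun l => PySem.List.pyGetD l.toList (k : Int) ' ')) := by
  induction lines with
  | nil => intro cols k hk; simp [PySem.Set.update_nil]
  | cons l ls ih =>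
      intro cols k hk
      have hk' : k < (pvStep l cols).length := by rw [pvStep_length]; exact hk
      simp only [List.foldl_cons, List.map_cons]
      rw [ih (pvStep l cols) k hk', pvStep_getElem l cols k hk, PySem.Set.update_cons]

-- B's combined fold splits into the column fold and A's row fold
theorem pvB_fold (graph : List String) :
    ∀ (s : Int) (init : List (PySem.Set Char)) (ys0 : List Int),
      (PySem.List.enumerate graph s).foldl
        (fun st p =>
          ((PySem.List.enumerate st.1).map
             (fun q => PySem.Set.union q.2 (PySem.Set.ofList [PySem.List.pyGetD p.2.toList q.1 ' '])),
           if PySem.Set.len (PySem.Set.ofList p.2.toList) == 1 then st.2 ++ [p.1] else st.2))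
        (init, ys0)
      = (graph.foldl (fun c l => pvStep l c) init,
         (PySem.List.enumerate graph s).foldl
           (fun ys p => if PySem.Set.len (PySem.Set.ofList p.2.toList) == 1 then ys ++ [p.1] else ys) ys0) := by
  induction graph with
  | nil => intro s init ys0; rfl
  | cons l ls ih =>
      intro s init ys0
      simp only [PySem.List.enumerate_cons, List.foldl_cons]
      rw [ih]
      rfl

theorem find_empties_eq (graph : List String) : find_empties graph = find_empties_alt graph := by
  simp only [find_empties, find_empties_alt]
  rw [pvB_fold]
  congr 1
  -- remaining: A's xs list = B's xs list
  rw [PySem.List.foldl_append_if_eq_filter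
        (p := fun x => PySem.Set.len (PySem.Set.ofList
          (graph.foldl (fun ch line => ch ++ [PySem.List.pyGetD line.toList x ' ']) [])) == 1)]
  simp only [List.nil_append]
  refine List.filter_congr ?_
  intro x hx
  have hmem := PySem.List.mem_pyRange_one.mp hx
  have hx0 : 0 ≤ x := hmem.1
  have hW : x < PySem.Str.len (PySem.List.pyGetD graph 0 "") := hmem.2
  set W : Int := PySem.Str.len (PySem.List.pyGetD graph 0 "") with hWdef
  have hlenInit : ((PySem.List.pyRange 0 W 1).map
      (fun _ => (PySem.Set.empty : PySem.Set Char))).length = (W - 0).toNat := by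
    rw [List.length_map, PySem.List.length_pyRange_one]
  have hk : x.toNat < ((PySem.List.pyRange 0 W 1).map
      (fun _ => (PySem.Set.empty : PySem.Set Char))).length := by
    rw [hlenInit]; omega
  have hxk : x = (x.toNat : Int) := by omega
  have hfoldlen : (graph.foldl (fun c l => pvStep l c)
      ((PySem.List.pyRange 0 W 1).map (fun _ => (PySem.Set.empty : PySem.Set Char)))).length
      = ((PySem.List.pyRange 0 W 1).map (fun _ => (PySem.Set.empty : PySem.Set Char))).length :=
    pvFold_length graph _
  have hget : PySem.List.pyGetD (graph.foldl (fun c l => pvStep l c)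
      ((PySem.List.pyRange 0 W 1).map (fun _ => (PySem.Set.empty : PySem.Set Char)))) x []
      = (graph.foldl (fun c l => pvStep l c)
          ((PySem.List.pyRange 0 W 1).map (fun _ => (PySem.Set.empty : PySem.Set Char))))[x.toNat]'
            (by rw [hfoldlen]; exact hk) := by
    refine PySem.List.pyGetD_eq_getElem _ _ hx0 ?_
    rw [hfoldlen, hlenInit]; omega
  rw [hget, pvFold_getElem graph _ x.toNat hk]
  have hinit : ((PySem.List.pyRange 0 W 1).map
      (fun _ => (PySem.Set.empty : PySem.Set Char)))[x.toNat]'hk = PySem.Set.empty := by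
    simp
  rw [hinit, show (PySem.Set.empty : PySem.Set Char) = [] from rfl, PySem.Set.update_nil_left,
      PySem.List.foldl_append_singleton_eq_map (fun line : String => PySem.List.pyGetD line.toList x ' ') graph []]
  rw [hxk]
  simp

-- ===== VERDICT (by name: the statement is the Claim_ definition above) =====
theorem find_empties_spec : Claim_equal_find_empties := by
  intro graph _ _
  unfold Spec_find_empties
  exact find_empties_eq graph
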